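-- pv_equiv track=rewrite | github.com/RohanSanjayPol/DSA | 13 strings/03 longest palindrome.py | longestPlindrome
-- ===== SOURCE A (Python) =====
-- def longestPlindrome(str):
--     # count of each element
--     n=len(str)
--     count=[]
--
--     for i in range(n-1):
--         val=1
--         for j in range(i+1,n):
--             if str[i]==str[j]:
--                 val+=1
--         count.append(val)
--     return count
-- ===== SOURCE B (Python) =====
-- def longestPlindrome(str):
--     # One right-to-left pass maintaining a running count per character,
--     # then reverse and drop the entry for the last position.
--     counts = {}
--     out = []
--     for ch in reversed(str):
--         c = counts.get(ch, 0) + 1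
--         counts[ch] = c
--         out.append(c)
--     return out[::-1][:-1]
-- ===== Notes on version B (the rewrite author's own statement) =====
-- stated objective: faster
-- what changed: Replaced the quadratic scan (for each position, rescanning the whole suffix for equal characters) with a single right-to-left pass that maintains a dict of running per-character counts, building the result back-to-front.
import Mathlib
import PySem

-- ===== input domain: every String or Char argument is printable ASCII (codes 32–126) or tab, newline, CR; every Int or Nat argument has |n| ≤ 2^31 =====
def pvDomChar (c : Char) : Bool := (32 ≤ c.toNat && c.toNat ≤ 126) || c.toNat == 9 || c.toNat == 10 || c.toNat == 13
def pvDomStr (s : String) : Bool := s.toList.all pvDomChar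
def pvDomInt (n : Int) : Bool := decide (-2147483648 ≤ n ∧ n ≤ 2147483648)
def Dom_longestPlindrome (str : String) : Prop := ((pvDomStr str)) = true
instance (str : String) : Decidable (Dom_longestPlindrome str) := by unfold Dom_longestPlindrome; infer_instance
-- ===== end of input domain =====

-- B replaces A's quadratic suffix rescan by one right-to-left pass with a dict of running counts (faster, asymptotic).

-- ===== PORT A =====
def longestPlindrome (str : String) : List Int :=
  let n : Int := PySem.Str.len str
  (PySem.List.pyRange 0 (n - 1) 1).foldl (fun count i =>
    let val := (PySem.List.pyRange (i + 1) n 1).foldl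
      (fun val j => if PySem.Str.pyGet? str i = PySem.Str.pyGet? str j then val + 1 else val) 1
    count ++ [val]) []

-- ===== PORT B =====
-- 'for ch in reversed(str)' = foldl over str.toList.reverse; 'out[::-1]' is reverse
-- (PySem.List.slice?_none_none_neg_one) and '[:-1]' is dropLast (PySem.List.slice_to_neg_one) — exact.
def longestPlindrome_alt (str : String) : List Int :=
  let st := str.toList.reverse.foldl
    (fun (st : PySem.Dict Char Int × List Int) ch =>
      let c := st.1.getD ch 0 + 1
      (st.1.insert ch c, st.2 ++ [c])) (PySem.Dict.empty, [])
  st.2.reverse.dropLast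

-- ===== PRECONDITION & SPEC =====
def Spec_longestPlindrome (str : String) (out : List Int) : Prop := out = longestPlindrome_alt str
instance (str : String) (out : List Int) : Decidable (Spec_longestPlindrome str out) := by unfold Spec_longestPlindrome; infer_instance

-- ===== CLAIM (what is proved, stated in full; the proofs are below) =====
def Claim_equal_longestPlindrome : Prop := ∀ (str : String), Dom_longestPlindrome str → Spec_longestPlindrome str (longestPlindrome str)

-- ===== LEMMAS AND PROOFS =====

/-- Suffix counts: `gcount cs` lists, for each position, the number of occurrences of
the character at that position in the suffix starting there. -/
def gcount : List Char → List Int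
  | [] => []
  | c :: t => ((t.count c : Int) + 1) :: gcount t

lemma countRange (cs : List Char) (c : Char) (k : Nat)
    (hn : cs.length - k = m) :
    ((PySem.List.pyRange (k : Int) (cs.length : Int) 1).countP
      (fun j => some c = PySem.List.pyGet? cs j) : Int)
      = ((cs.drop k).count c : Int) := by
  induction m generalizing k with
  | zero =>
    have hk : (cs.length : Int) ≤ (k : Int) := by exact_mod_cast Nat.le_of_sub_eq_zero hn
    rw [PySem.List.pyRange_one_eq_nil hk, List.drop_eq_nil_of_le (by omega)]
    simp
  | succ m ih =>
    have hk : k < cs.length := by omega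
    rw [PySem.List.pyRange_one_cons (by exact_mod_cast hk)]
    have hget : PySem.List.pyGet? cs (k : Int) = some cs[k] := by
      simp [PySem.List.pyGet?_natCast, List.getElem?_eq_getElem hk]
    have hdrop : cs.drop k = cs[k] :: cs.drop (k + 1) := List.drop_eq_getElem_cons hk
    have hcast : ((k : Int) + 1) = ((k + 1 : Nat) : Int) := by push_cast; ring
    rw [List.countP_cons, hdrop, List.count_cons, hget]
    push_cast
    rw [hcast, ih (k + 1) (by omega)]
    by_cases h : cs[k] = c
    · subst h; simp
    · simp [h, Ne.symm h]

lemma innerVal (str : String) (k : Nat) (hk : k < str.toList.length) :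
    (PySem.List.pyRange ((k : Int) + 1) (str.toList.length : Int) 1).foldl
      (fun val j => if PySem.Str.pyGet? str (k : Int) = PySem.Str.pyGet? str j then val + 1 else val) 1
      = ((str.toList.drop k).count str.toList[k] : Int) := by
  have hget : PySem.Str.pyGet? str (k : Int) = some str.toList[k] := by
    simp [List.getElem?_eq_getElem hk]
  rw [hget, PySem.List.foldl_ite_add_one]
  have h1 : ((k : Int) + 1) = ((k + 1 : Nat) : Int) := by push_cast; ring
  have hc : ∀ j : Int, PySem.Str.pyGet? str j = PySem.List.pyGet? str.toList j := by
    intro j; rfl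
  simp only [h1, hc]
  rw [countRange str.toList str.toList[k] (k + 1) rfl]
  have hdrop : str.toList.drop k = str.toList[k] :: str.toList.drop (k + 1) :=
    List.drop_eq_getElem_cons hk
  rw [hdrop, List.count_cons]
  simp [add_comm]

lemma mapRange_gcount (cs : List Char) :
    (List.range (cs.length - 1)).map
        (fun k => ((cs.drop k).count (cs.getD k default) : Int))
      = (gcount cs).dropLast := by
  induction cs with
  | nil => simp [gcount]
  | cons c t ih =>
    cases t with
    | nil => simp [gcount]
    | cons d t' =>
      have hlen : (c :: d :: t').length - 1 = t'.length + 1 := by simp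
      rw [hlen, List.range_succ_eq_map, List.map_cons, List.map_map]
      have hhd : (((c :: d :: t').drop 0).count ((c :: d :: t').getD 0 default) : Int)
          = ((d :: t').count c : Int) + 1 := by
        simp [List.count_cons_self]
      have hshift : (List.range t'.length).map
            ((fun k => (((c :: d :: t').drop k).count ((c :: d :: t').getD k default) : Int)) ∘ Nat.succ)
          = (List.range ((d :: t').length - 1)).map
            (fun k => (((d :: t').drop k).count ((d :: t').getD k default) : Int)) := by
        simp [Function.comp_def]
      rw [hhd, hshift, ih]
      simp [gcount, List.dropLast_cons₂]

/-- Port A computes the suffix counts for all positions but the last. -/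
lemma portA_eq (str : String) : longestPlindrome str = (gcount str.toList).dropLast := by
  unfold longestPlindrome
  rw [PySem.List.foldl_append_singleton_eq_map]
  rw [show PySem.Str.len str = (str.toList.length : Int) from PySem.Str.len_eq str]
  by_cases h0 : str.toList.length = 0
  · rw [List.length_eq_zero_iff] at h0
    simp [h0, PySem.List.pyRange_one_eq_nil, gcount]
  · rw [show ((str.toList.length : Int) - 1) = (((str.toList.length - 1 : Nat)) : Int) by omega,
      PySem.List.pyRange_zero_natCast, List.map_map]
    rw [← mapRange_gcount str.toList]
    apply List.map_congr_left
    intro k hk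
    rw [List.mem_range] at hk
    have hklen : k < str.toList.length := by omega
    simp only [Function.comp_def]
    rw [innerVal str k hklen, List.getD_eq_getElem str.toList default hklen]

/-- The right-to-left loop of B produces the reversed suffix counts, and the dict holds
the running per-character counts of the processed suffix. -/
lemma bfold (s : List Char) :
    ∃ d : PySem.Dict Char Int,
      (∀ ch, d.getD ch 0 = (s.count ch : Int)) ∧
      s.reverse.foldl
        (fun (st : PySem.Dict Char Int × List Int) ch =>
          let c := st.1.getD ch 0 + 1
          (st.1.insert ch c, st.2 ++ [c])) (PySem.Dict.empty, [])
        = (d, (gcount s).reverse) := by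
  induction s with
  | nil => exact ⟨PySem.Dict.empty, by simp [PySem.Dict.getD_empty], by simp [gcount]⟩
  | cons c t ih =>
    obtain ⟨d, hd, hfold⟩ := ih
    refine ⟨d.insert c (d.getD c 0 + 1), ?_, ?_⟩
    · intro ch
      rw [PySem.Dict.getD_insert]
      by_cases h : ch = c
      · subst h; rw [hd]; simp

      · simp [h, hd ch, Ne.symm h]
    · rw [List.reverse_cons, List.foldl_append, hfold]
      simp only [List.foldl_cons, List.foldl_nil]
      rw [hd c]
      simp [gcount]

lemma portB_eq (str : String) : longestPlindrome_alt str = (gcount str.toList).dropLast := by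
  unfold longestPlindrome_alt
  obtain ⟨d, _, hfold⟩ := bfold str.toList
  rw [hfold]
  simp

-- ===== VERDICT (by name: the statement is the Claim_ definition above) =====
theorem longestPlindrome_spec : Claim_equal_longestPlindrome := by
  intro str _
  unfold Spec_longestPlindrome
  rw [portA_eq, portB_eq]
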